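-- pv_equiv track=rewrite | github.com/cornijo/opstracker-pro | gsa_rates.py | get_mie_breakdown
-- ===== SOURCE A (Python) =====
-- MIE_BREAKDOWN = {
--     59: {"breakfast": 13, "lunch": 15, "dinner": 26, "incidentals": 5, "first_last_day": 44},
--     64: {"breakfast": 14, "lunch": 16, "dinner": 29, "incidentals": 5, "first_last_day": 48},
--     68: {"breakfast": 16, "lunch": 17, "dinner": 31, "incidentals": 5, "first_last_day": 51},  # removed extra entry
--     69: {"breakfast": 16, "lunch": 17, "dinner": 31, "incidentals": 5, "first_last_day": 52},
--     74: {"breakfast": 17, "lunch": 18, "dinner": 34, "incidentals": 5, "first_last_day": 56},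
--     79: {"breakfast": 18, "lunch": 20, "dinner": 36, "incidentals": 5, "first_last_day": 59},
-- }
--
-- def get_mie_breakdown(mie_total):
--     """
--     Return the meal breakdown dict for a given M&IE total.
--     Falls back to the nearest lower tier if exact match not found.
--     """
--     if mie_total in MIE_BREAKDOWN:
--         return MIE_BREAKDOWN[mie_total]
--     # Find the nearest tier that doesn't exceed the actual rate
--     available = sorted(MIE_BREAKDOWN.keys())
--     tier = available[0]
--     for t in available:
--         if t <= mie_total:
--             tier = t
--     return MIE_BREAKDOWN[tier]
-- ===== SOURCE B (Python) =====
-- MIE_BREAKDOWN = {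
--     59: {"breakfast": 13, "lunch": 15, "dinner": 26, "incidentals": 5, "first_last_day": 44},
--     64: {"breakfast": 14, "lunch": 16, "dinner": 29, "incidentals": 5, "first_last_day": 48},
--     68: {"breakfast": 16, "lunch": 17, "dinner": 31, "incidentals": 5, "first_last_day": 51},
--     69: {"breakfast": 16, "lunch": 17, "dinner": 31, "incidentals": 5, "first_last_day": 52},
--     74: {"breakfast": 17, "lunch": 18, "dinner": 34, "incidentals": 5, "first_last_day": 56},
--     79: {"breakfast": 18, "lunch": 20, "dinner": 36, "incidentals": 5, "first_last_day": 59},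
-- }
--
--
-- def get_mie_breakdown(mie_total):
--     """
--     Return the meal breakdown for a given M&IE total as an explicit
--     descending threshold ladder: the first tier not exceeding mie_total
--     applies; anything below the minimum gets the lowest tier.
--     """
--     if mie_total >= 79:
--         return {"breakfast": 18, "lunch": 20, "dinner": 36, "incidentals": 5, "first_last_day": 59}
--     if mie_total >= 74:
--         return {"breakfast": 17, "lunch": 18, "dinner": 34, "incidentals": 5, "first_last_day": 56}
--     if mie_total >= 69:
--         return {"breakfast": 16, "lunch": 17, "dinner": 31, "incidentals": 5, "first_last_day": 52}
--     if mie_total >= 68: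
--         return {"breakfast": 16, "lunch": 17, "dinner": 31, "incidentals": 5, "first_last_day": 51}
--     if mie_total >= 64:
--         return {"breakfast": 14, "lunch": 16, "dinner": 29, "incidentals": 5, "first_last_day": 48}
--     return {"breakfast": 13, "lunch": 15, "dinner": 26, "incidentals": 5, "first_last_day": 44}
-- ===== Notes on version B (the rewrite author's own statement) =====
-- stated objective: simpler
-- what changed: Replaces the exact-match dict fast path plus a sort-and-linear-scan over the table keys with a direct descending threshold ladder of early returns, with no dict lookup, sort or loop at all.
import Mathlib
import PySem

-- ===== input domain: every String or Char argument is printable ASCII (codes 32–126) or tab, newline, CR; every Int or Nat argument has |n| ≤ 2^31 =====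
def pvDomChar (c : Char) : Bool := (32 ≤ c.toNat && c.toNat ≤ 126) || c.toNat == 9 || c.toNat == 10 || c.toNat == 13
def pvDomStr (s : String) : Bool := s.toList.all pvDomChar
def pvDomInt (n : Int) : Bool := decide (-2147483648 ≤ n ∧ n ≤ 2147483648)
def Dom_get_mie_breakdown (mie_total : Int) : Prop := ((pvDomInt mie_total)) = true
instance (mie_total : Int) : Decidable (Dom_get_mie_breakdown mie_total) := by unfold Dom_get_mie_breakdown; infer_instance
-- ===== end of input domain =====

-- B replaces A's exact-match dict fast path + sort + linear scan by a loop-free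
-- descending threshold ladder of early returns (objective: simpler).

-- ===== PORT A =====
-- the module-level MIE_BREAKDOWN table (context of program A)
def mieBreakdown : PySem.Dict Int (List (String × Int)) :=
  PySem.Dict.mk
    [(59, [("breakfast", 13), ("lunch", 15), ("dinner", 26), ("incidentals", 5), ("first_last_day", 44)]),
     (64, [("breakfast", 14), ("lunch", 16), ("dinner", 29), ("incidentals", 5), ("first_last_day", 48)]),
     (68, [("breakfast", 16), ("lunch", 17), ("dinner", 31), ("incidentals", 5), ("first_last_day", 51)]),
     (69, [("breakfast", 16), ("lunch", 17), ("dinner", 31), ("incidentals", 5), ("first_last_day", 52)]),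
     (74, [("breakfast", 17), ("lunch", 18), ("dinner", 34), ("incidentals", 5), ("first_last_day", 56)]),
     (79, [("breakfast", 18), ("lunch", 20), ("dinner", 36), ("incidentals", 5), ("first_last_day", 59)])]

-- literal port of A; the final dict lookups use getD [] — exact here since the key is always present
def get_mie_breakdown (mie_total : Int) : List (String × Int) :=
  if PySem.Dict.contains mieBreakdown mie_total then
    (PySem.Dict.get? mieBreakdown mie_total).getD []
  else
    let available := PySem.List.sorted (PySem.Dict.keys mieBreakdown) (fun x => x) false
    let tier := available.foldl (fun tier t => if t ≤ mie_total then t else tier)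
      (PySem.List.pyGetD available 0 0)
    (PySem.Dict.get? mieBreakdown tier).getD []

-- ===== PORT B =====
-- Source B: a chain of early returns on descending thresholds, each yielding its row literal
def get_mie_breakdown_alt (mie_total : Int) : List (String × Int) :=
  if mie_total ≥ 79 then [("breakfast", 18), ("lunch", 20), ("dinner", 36), ("incidentals", 5), ("first_last_day", 59)]
  else if mie_total ≥ 74 then [("breakfast", 17), ("lunch", 18), ("dinner", 34), ("incidentals", 5), ("first_last_day", 56)]
  else if mie_total ≥ 69 then [("breakfast", 16), ("lunch", 17), ("dinner", 31), ("incidentals", 5), ("first_last_day", 52)]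
  else if mie_total ≥ 68 then [("breakfast", 16), ("lunch", 17), ("dinner", 31), ("incidentals", 5), ("first_last_day", 51)]
  else if mie_total ≥ 64 then [("breakfast", 14), ("lunch", 16), ("dinner", 29), ("incidentals", 5), ("first_last_day", 48)]
  else [("breakfast", 13), ("lunch", 15), ("dinner", 26), ("incidentals", 5), ("first_last_day", 44)]

-- ===== PRECONDITION & SPEC =====
def Spec_get_mie_breakdown (mie_total : Int) (out : List (String × Int)) : Prop := out = get_mie_breakdown_alt mie_total
instance (mie_total : Int) (out : List (String × Int)) : Decidable (Spec_get_mie_breakdown mie_total out) := by unfold Spec_get_mie_breakdown; infer_instance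

-- ===== CLAIM (what is proved, stated in full; the proofs are below) =====
def Claim_equal_get_mie_breakdown : Prop := ∀ (mie_total : Int), Dom_get_mie_breakdown mie_total → Spec_get_mie_breakdown mie_total (get_mie_breakdown mie_total)

-- ===== LEMMAS AND PROOFS =====
theorem sortedKeys_eq :
    PySem.List.sorted (PySem.Dict.keys mieBreakdown) (fun x => x) false = [59, 64, 68, 69, 74, 79] := by decide

theorem ports_agree (n : Int) : get_mie_breakdown n = get_mie_breakdown_alt n := by
  unfold get_mie_breakdown get_mie_breakdown_alt
  rw [sortedKeys_eq]
  by_cases hlo : n < 59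
  · have e1 : ((59 : Int) == n) = false := by simp; omega
    have e2 : ((64 : Int) == n) = false := by simp; omega
    have e3 : ((68 : Int) == n) = false := by simp; omega
    have e4 : ((69 : Int) == n) = false := by simp; omega
    have e5 : ((74 : Int) == n) = false := by simp; omega
    have e6 : ((79 : Int) == n) = false := by simp; omega
    have h1 : ¬ (59 : Int) ≤ n := by omega
    have h2 : ¬ (64 : Int) ≤ n := by omega
    have h3 : ¬ (68 : Int) ≤ n := by omega
    have h4 : ¬ (69 : Int) ≤ n := by omega
    have h5 : ¬ (74 : Int) ≤ n := by omega
    have h6 : ¬ (79 : Int) ≤ n := by omega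
    have g1 : ¬ n ≥ (79 : Int) := by omega
    have g2 : ¬ n ≥ (74 : Int) := by omega
    have g3 : ¬ n ≥ (69 : Int) := by omega
    have g4 : ¬ n ≥ (68 : Int) := by omega
    have g5 : ¬ n ≥ (64 : Int) := by omega
    simp [mieBreakdown, PySem.Dict.contains, PySem.Dict.get?, PySem.List.pyGetD, PySem.List.pyGet?, PySem.List.pyIdx?,
      e1, e2, e3, e4, e5, e6, h1, h2, h3, h4, h5, h6]
  · by_cases hhi : n ≤ 79
    · have h' : 59 ≤ n := by omega
      interval_cases n <;> decide
    · have e1 : ((59 : Int) == n) = false := by simp; omega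
      have e2 : ((64 : Int) == n) = false := by simp; omega
      have e3 : ((68 : Int) == n) = false := by simp; omega
      have e4 : ((69 : Int) == n) = false := by simp; omega
      have e5 : ((74 : Int) == n) = false := by simp; omega
      have e6 : ((79 : Int) == n) = false := by simp; omega
      have h1 : (59 : Int) ≤ n := by omega
      have h2 : (64 : Int) ≤ n := by omega
      have h3 : (68 : Int) ≤ n := by omega
      have h4 : (69 : Int) ≤ n := by omega
      have h5 : (74 : Int) ≤ n := by omega
      have h6 : (79 : Int) ≤ n := by omega
      simp [mieBreakdown, PySem.Dict.contains, PySem.Dict.get?, PySem.List.pyGetD, PySem.List.pyGet?, PySem.List.pyIdx?,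
        e1, e2, e3, e4, e5, e6, h1, h2, h3, h4, h5, h6]

-- ===== VERDICT (by name: the statement is the Claim_ definition above) =====
theorem get_mie_breakdown_spec : Claim_equal_get_mie_breakdown := by
  intro n _
  unfold Spec_get_mie_breakdown
  exact ports_agree n
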